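-- pv_equiv track=rewrite | github.com/anirudhvenk/synopsys-2021 | verify_drugs.py | get_h_bond_donors
-- ===== SOURCE A (Python) =====
-- def get_h_bond_donors(mol):
--     idx = 0
--     donors = 0
--     while idx < len(mol)-1:
--         if mol[idx].lower() == "o" or mol[idx].lower() == "n":
--             if mol[idx+1].lower() == "h":
--                 donors += 1
--         idx += 1
--     return donors
-- ===== SOURCE B (Python) =====
-- def get_h_bond_donors(mol):
--     low = mol.lower()
--     return low.count("oh") + low.count("nh")
-- ===== Notes on version B (the rewrite author's own statement) =====
-- stated objective: idiomatic
-- what changed: Replaced the manual per-index while-loop over adjacent characters by lowercasing the string once and summing the library substring counts of the two donor patterns o+h and n+h (str.count's non-overlapping scan equals the per-index count because an h never starts a donor pair).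
import Mathlib
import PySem

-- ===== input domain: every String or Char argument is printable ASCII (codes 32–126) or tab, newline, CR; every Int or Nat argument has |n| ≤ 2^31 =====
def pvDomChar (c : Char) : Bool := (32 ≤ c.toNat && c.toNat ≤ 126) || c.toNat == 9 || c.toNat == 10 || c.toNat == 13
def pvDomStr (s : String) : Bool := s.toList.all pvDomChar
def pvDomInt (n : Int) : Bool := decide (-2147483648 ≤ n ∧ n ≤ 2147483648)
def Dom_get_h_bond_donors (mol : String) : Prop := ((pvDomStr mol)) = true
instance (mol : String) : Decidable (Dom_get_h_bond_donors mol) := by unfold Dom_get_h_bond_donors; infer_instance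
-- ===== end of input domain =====

-- B lowercases the string once and sums the library substring counts of "oh" and "nh" instead of A's manual index loop (idiomatic, same O(n) cost).


-- ===== PORT A =====
-- while idx < len(mol)-1: check mol[idx].lower() in {o,n} and mol[idx+1].lower()=='h'
-- .lower() on a one-char string is PySem.Chars.lowerChar (exact on the ASCII domain)
def get_h_bond_donors_loop (l : List Char) (idx : Nat) (donors : Int) : Int :=
  if _h : idx < l.length - 1 then
    get_h_bond_donors_loop l (idx + 1)
      (if PySem.Chars.lowerChar (l.getD idx ' ') == 'o' ||
          PySem.Chars.lowerChar (l.getD idx ' ') == 'n' then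
        (if PySem.Chars.lowerChar (l.getD (idx + 1) ' ') == 'h' then donors + 1 else donors)
      else donors)
  else donors
termination_by l.length - idx

def get_h_bond_donors (mol : String) : Int :=
  get_h_bond_donors_loop mol.toList 0 0

-- ===== PORT B =====
-- low = mol.lower(); return low.count("oh") + low.count("nh")
def get_h_bond_donors_alt (mol : String) : Int :=
  let low := PySem.Str.lower mol
  ((PySem.Str.count low "oh" : Nat) : Int) + ((PySem.Str.count low "nh" : Nat) : Int)

-- ===== PRECONDITION & SPEC =====
def Spec_get_h_bond_donors (mol : String) (out : Int) : Prop := out = get_h_bond_donors_alt mol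
instance (mol : String) (out : Int) : Decidable (Spec_get_h_bond_donors mol out) := by unfold Spec_get_h_bond_donors; infer_instance

-- ===== CLAIM (what is proved, stated in full; the proofs are below) =====
def Claim_equal_get_h_bond_donors : Prop := ∀ (mol : String), Dom_get_h_bond_donors mol → Spec_get_h_bond_donors mol (get_h_bond_donors mol)

-- ===== LEMMAS AND PROOFS =====

-- adjacent-pair count of "a followed by 'h'"
def pvPairCnt (a : Char) (l : List Char) : Nat :=
  (l.zip l.tail).countP (fun p => p.1 == a && p.2 == 'h')

-- A's combined adjacent-pair count on the raw string (lowering each char)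
def pvZ (l : List Char) : Int :=
  (((l.zip l.tail).countP (fun p =>
      (PySem.Chars.lowerChar p.1 == 'o' || PySem.Chars.lowerChar p.1 == 'n') &&
      PySem.Chars.lowerChar p.2 == 'h')) : Nat)

theorem pvZ_cons (a b : Char) (t : List Char) :
    pvZ (a :: b :: t) =
      (if (PySem.Chars.lowerChar a == 'o' || PySem.Chars.lowerChar a == 'n') &&
          PySem.Chars.lowerChar b == 'h' then 1 else 0) + pvZ (b :: t) := by
  simp [pvZ, List.countP_cons]
  split_ifs <;> omega

theorem pvZ_short (xs : List Char) (h : xs.length ≤ 1) : pvZ xs = 0 := by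
  match xs with
  | [] => simp [pvZ]
  | [a] => simp [pvZ]
  | _ :: _ :: _ => simp at h

set_option maxRecDepth 4096 in
theorem loop_eq (l : List Char) (idx : Nat) (donors : Int) :
    get_h_bond_donors_loop l idx donors = donors + pvZ (l.drop idx) := by
  fun_induction get_h_bond_donors_loop l idx donors with
  | case1 idx donors h ih =>
    have h1 : idx < l.length := by omega
    have h2 : idx + 1 < l.length := by omega
    have hd1 : l.drop idx = l[idx] :: l.drop (idx + 1) := List.drop_eq_getElem_cons h1
    have hd2 : l.drop (idx + 1) = l[idx + 1] :: l.drop (idx + 2) := List.drop_eq_getElem_cons h2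
    simp only [dite_eq_ite] at ih
    rw [ih, hd1, hd2, pvZ_cons, ← hd2]
    have g1 : l.getD idx ' ' = l[idx] := List.getD_eq_getElem l ' ' h1
    have g2 : l.getD (idx + 1) ' ' = l[idx + 1] := List.getD_eq_getElem l ' ' h2
    rw [g1, g2]
    clear ih hd1 hd2 g1 g2
    split_ifs <;> simp_all <;> ring
  | case2 idx donors h =>
    have : (l.drop idx).length ≤ 1 := by simp; omega
    rw [pvZ_short _ this]; ring

theorem pvPairCnt_cons_h (a : Char) (ha : (a == 'h') = false) (t : List Char) :
    pvPairCnt a ('h' :: t) = pvPairCnt a t := by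
  have hha : ('h' == a) = false := by
    cases hq : ('h' == a)
    · rfl
    · exfalso
      have : a = 'h' := (beq_iff_eq.mp hq).symm
      rw [this] at ha
      exact absurd ha (by decide)
  cases t with
  | nil => simp [pvPairCnt]
  | cons y t' => simp [pvPairCnt, hha]

-- str.count's non-overlapping scan for a two-char pattern [a,'h'] (a ≠ 'h') equals the per-index pair count
theorem pvGo_eq (a : Char) (ha : (a == 'h') = false) (fuel : Nat) (l : List Char) (acc : Nat)
    (h : l.length ≤ fuel) :
    PySem.Chars.count.go [a, 'h'] fuel l acc = acc + pvPairCnt a l := by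
  induction fuel generalizing l acc with
  | zero =>
    have hl : l = [] := by cases l <;> simp_all
    subst hl
    have hgo : PySem.Chars.count.go [a, 'h'] 0 [] acc = acc := rfl
    rw [hgo]; simp [pvPairCnt]
  | succ fuel ih =>
    cases l with
    | nil =>
      have hgo : PySem.Chars.count.go [a, 'h'] (fuel + 1) [] acc = acc := rfl
      rw [hgo]; simp [pvPairCnt]
    | cons x t =>
      rw [PySem.Chars.count.go]
      by_cases hp : [a, 'h'].isPrefixOf (x :: t) = true
      · rw [if_pos hp]
        cases t with
        | nil => simp [List.isPrefixOf] at hp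
        | cons y t' =>
          have hx : x = a := by simp [List.isPrefixOf] at hp; exact hp.1.symm
          have hy : y = 'h' := by simp [List.isPrefixOf] at hp; exact hp.2.symm
          subst hx; subst hy
          have hdrop : List.drop [x, 'h'].length (x :: 'h' :: t') = t' := rfl
          rw [hdrop]
          have hlen : t'.length ≤ fuel := by simp at h; omega
          rw [ih t' (acc + 1) hlen]
          have hstep : pvPairCnt x (x :: 'h' :: t') = 1 + pvPairCnt x ('h' :: t') := by
            simp [pvPairCnt]; omega
          rw [hstep, pvPairCnt_cons_h x ha t']
          omega
      · rw [if_neg hp]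
        have hlen : t.length ≤ fuel := by simp at h; omega
        rw [ih t acc hlen]
        cases t with
        | nil => simp [pvPairCnt]
        | cons y t' =>
          have hft : (x == a && y == 'h') = false := by
            by_contra hc
            simp at hc
            exact hp (by simp [List.isPrefixOf, hc.1, hc.2])
          simp [pvPairCnt, hft]

theorem pvCount_eq (a : Char) (ha : (a == 'h') = false) (l : List Char) :
    PySem.Chars.count l [a, 'h'] = pvPairCnt a l := by
  simp [PySem.Chars.count]
  simpa using pvGo_eq a ha l.length l 0 (le_refl _)

-- splitting a conjunction with a disjoint disjunction on the left
theorem countP_or_split {α : Type} (p q r : α → Bool) (hdis : ∀ x, (p x && q x) = false)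
    (l : List α) :
    l.countP (fun x => (p x || q x) && r x) =
      l.countP (fun x => p x && r x) + l.countP (fun x => q x && r x) := by
  induction l with
  | nil => simp
  | cons x t ih =>
    have := hdis x
    simp only [List.countP_cons, ih]
    cases hp : p x <;> cases hq : q x <;> cases hr : r x <;> simp_all <;> omega

theorem zip_tail_map {α β : Type} (f : α → β) (l : List α) :
    ((l.map f).zip (l.map f).tail) = (l.zip l.tail).map (fun p => (f p.1, f p.2)) := by
  cases l with
  | nil => simp
  | cons x t =>
    show ((x :: t).map f).zip (t.map f) = _
    rw [List.zip_map]
    apply List.map_congr_left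
    intro p _
    cases p
    rfl

theorem pvPairCnt_lower (a : Char) (l : List Char) :
    pvPairCnt a (PySem.Chars.lower l) =
      (l.zip l.tail).countP (fun p =>
        PySem.Chars.lowerChar p.1 == a && PySem.Chars.lowerChar p.2 == 'h') := by
  simp only [pvPairCnt, PySem.Chars.lower, zip_tail_map, List.countP_map]
  rfl

-- ===== VERDICT (by name: the statement is the Claim_ definition above) =====
theorem get_h_bond_donors_spec : Claim_equal_get_h_bond_donors := by
  intro mol _
  unfold Spec_get_h_bond_donors get_h_bond_donors get_h_bond_donors_alt
  rw [loop_eq, List.drop_zero]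
  simp only [PySem.Str.count_eq, PySem.Str.toList_lower]
  have ho : ("oh".toList) = ['o', 'h'] := rfl
  have hn : ("nh".toList) = ['n', 'h'] := rfl
  rw [ho, hn, pvCount_eq 'o' (by decide), pvCount_eq 'n' (by decide),
    pvPairCnt_lower, pvPairCnt_lower]
  unfold pvZ
  rw [countP_or_split (fun p => PySem.Chars.lowerChar p.1 == 'o')
    (fun p => PySem.Chars.lowerChar p.1 == 'n')
    (fun p => PySem.Chars.lowerChar p.2 == 'h')
    (by
      intro x
      cases h1 : (PySem.Chars.lowerChar x.1 == 'o')
      · simp [h1]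
      · have h1' : PySem.Chars.lowerChar x.1 = 'o' := beq_iff_eq.mp h1
        simp [h1'])
    (mol.toList.zip mol.toList.tail)]
  omega
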